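-- pv_equiv track=rewrite | github.com/pypi-data/pypi-mirror-82 | packages/botwinick-utils/botwinick_utils-0.0.2.tar.gz/botwinick_utils-0.0.2/botwinick_utils/regex.py | convert_list_to_numeric_ranges_str
-- ===== SOURCE A (Python) =====
-- def convert_list_to_numeric_ranges_str(source_list, range_sep=':', sep=', '):
--     """
--     Consolidate a list of values into a user-friendly string list that consolidates contiguous (generally int) ranges
--     separated by 1 into a user-readable format of ranges. This is the opposite operation of `parse_numeric_ranges`.
--
--     :param source_list: list of values e.g. [1,2,3,4,5,6,10,11,12,13]
--     :param range_sep: the string to place separating a range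
--     :param sep: the string to place between ranges
--     :return: a user-readable range str, e.g. "1:6, 10:13"
--     """
--     if not source_list:
--         return ''
--     data = sorted(set(source_list))
--
--     result = []
--     range_start = -1
--     for i in range(len(data)):
--         if 0 <= i < len(data) - 1 and range_start == -1 and data[i + 1] - data[i] == 1:  # range start
--             range_start = i
--         if range_start != -1 and ((i == len(data) - 1 and data[i] - data[i - 1] == 1) or
--                                   (i < len(data) - 1 and data[i + 1] - data[i] != 1)):  # range end
--             result.append('%s%s%s' % (data[range_start], range_sep, data[i]))
--             range_start = -1
--         elif range_start == -1:  # not a range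
--             result.append('%s' % data[i])
--
--     return sep.join(result)
-- ===== SOURCE B (Python) =====
-- def convert_list_to_numeric_ranges_str(source_list, range_sep=':', sep=', '):
--     if not source_list:
--         return ''
--     data = sorted(set(source_list))
--     # phase 1: collect runs of consecutive values as (start, end) pairs
--     runs = []
--     run_start = data[0]
--     prev = data[0]
--     for cur in data[1:]:
--         if cur - prev != 1:
--             runs.append((run_start, prev))
--             run_start = cur
--         prev = cur
--     runs.append((run_start, prev))
--     # phase 2: format
--     return sep.join(str(a) if a == b else '%s%s%s' % (a, range_sep, b)
--                     for a, b in runs)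
-- ===== Notes on version B (the rewrite author's own statement) =====
-- stated objective: simpler
-- what changed: Replaces A's fused index loop over range(len(data)) with a sentinel range_start index and three neighbour lookups per step by a two-phase value-level pass: first collect runs of consecutive values as (start, end) pairs by comparing each element with its predecessor, then format each pair.
import Mathlib
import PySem

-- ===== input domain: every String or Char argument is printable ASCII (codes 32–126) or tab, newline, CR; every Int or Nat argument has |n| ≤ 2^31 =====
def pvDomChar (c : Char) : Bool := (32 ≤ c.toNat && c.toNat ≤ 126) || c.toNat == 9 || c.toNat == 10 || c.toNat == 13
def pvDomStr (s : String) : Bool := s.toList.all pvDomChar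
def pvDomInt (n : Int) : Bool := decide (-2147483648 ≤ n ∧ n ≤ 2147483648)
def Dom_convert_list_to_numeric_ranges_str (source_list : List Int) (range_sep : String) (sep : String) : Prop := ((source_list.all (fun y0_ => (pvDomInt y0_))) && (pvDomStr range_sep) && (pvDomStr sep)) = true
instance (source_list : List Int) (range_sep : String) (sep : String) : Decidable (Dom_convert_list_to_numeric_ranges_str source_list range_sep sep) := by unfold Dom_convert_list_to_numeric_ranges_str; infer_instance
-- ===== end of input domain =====

-- B replaces A's fused index loop with a sentinel range_start index by a two-phase pass:
-- first collect the runs of consecutive values as (start, end) pairs, then format them (objective: simpler).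

-- ===== PORT A =====
-- one iteration of A's 'for i in range(len(data))' loop; state = (result, range_start)
def pvStepA (data : List Int) (range_sep : String) (st : List String × Int) (i : Int) : List String × Int :=
  let n : Int := (data.length : Int)
  let range_start :=
    if 0 ≤ i ∧ i < n - 1 ∧ st.2 = -1 ∧
        PySem.List.pyGetD data (i + 1) 0 - PySem.List.pyGetD data i 0 = 1
    then i else st.2
  if range_start ≠ -1 ∧
      ((i = n - 1 ∧ PySem.List.pyGetD data i 0 - PySem.List.pyGetD data (i - 1) 0 = 1) ∨
       (i < n - 1 ∧ PySem.List.pyGetD data (i + 1) 0 - PySem.List.pyGetD data i 0 ≠ 1))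
  then (st.1 ++ [PySem.Int.toStr (PySem.List.pyGetD data range_start 0) ++ range_sep ++
                 PySem.Int.toStr (PySem.List.pyGetD data i 0)], -1)
  else if range_start = -1 then (st.1 ++ [PySem.Int.toStr (PySem.List.pyGetD data i 0)], range_start)
  else (st.1, range_start)

def convert_list_to_numeric_ranges_str (source_list : List Int) (range_sep : String) (sep : String) : String :=
  if source_list.isEmpty then ""
  else
    let data := PySem.List.sorted (PySem.Set.ofList source_list) (fun x => x) false
    let st := (PySem.List.pyRange 0 (data.length : Int) 1).foldl (pvStepA data range_sep) ([], -1)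
    PySem.Str.join sep st.1

-- ===== PORT B =====
-- phase-2 formatting of one run
def pvFmt (range_sep : String) (ab : Int × Int) : String :=
  if ab.1 = ab.2 then PySem.Int.toStr ab.1
  else PySem.Int.toStr ab.1 ++ range_sep ++ PySem.Int.toStr ab.2

-- one iteration of B's run-collection loop; state = (runs, run_start, prev)
def pvStepB (st : List (Int × Int) × Int × Int) (cur : Int) : List (Int × Int) × Int × Int :=
  if cur - st.2.2 ≠ 1 then (st.1 ++ [(st.2.1, st.2.2)], cur, cur)
  else (st.1, st.2.1, cur)

def convert_list_to_numeric_ranges_str_alt (source_list : List Int) (range_sep : String) (sep : String) : String :=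
  if source_list.isEmpty then ""
  else
    let data := PySem.List.sorted (PySem.Set.ofList source_list) (fun x => x) false
    match data with
    | [] => ""   -- unreachable totality guard: data is nonempty when source_list is
    | d0 :: tl =>
      let st := tl.foldl pvStepB ([], d0, d0)
      let runs := st.1 ++ [(st.2.1, st.2.2)]
      PySem.Str.join sep (runs.map (pvFmt range_sep))

-- ===== PRECONDITION & SPEC =====
def Spec_convert_list_to_numeric_ranges_str (source_list : List Int) (range_sep : String) (sep : String) (out : String) : Prop := out = convert_list_to_numeric_ranges_str_alt source_list range_sep sep
instance (source_list : List Int) (range_sep : String) (sep : String) (out : String) : Decidable (Spec_convert_list_to_numeric_ranges_str source_list range_sep sep out) := by unfold Spec_convert_list_to_numeric_ranges_str; infer_instance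

-- ===== CLAIM (what is proved, stated in full; the proofs are below) =====
def Claim_equal_convert_list_to_numeric_ranges_str : Prop := ∀ (source_list : List Int) (range_sep : String) (sep : String), Dom_convert_list_to_numeric_ranges_str source_list range_sep sep → Spec_convert_list_to_numeric_ranges_str source_list range_sep sep (convert_list_to_numeric_ranges_str source_list range_sep sep)

-- ===== LEMMAS AND PROOFS =====

-- reference run decomposition both loops are proved against
def pvSpecRuns (s p : Int) : List Int → List (Int × Int)
  | [] => [(s, p)]
  | c :: rest => if c - p ≠ 1 then (s, p) :: pvSpecRuns c c rest else pvSpecRuns s c rest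

lemma pvFoldB_eq (rest : List Int) : ∀ (runs : List (Int × Int)) (s p : Int),
    (rest.foldl pvStepB (runs, s, p)).1 ++
      [((rest.foldl pvStepB (runs, s, p)).2.1, (rest.foldl pvStepB (runs, s, p)).2.2)]
      = runs ++ pvSpecRuns s p rest := by
  induction rest with
  | nil => intro runs s p; simp [pvSpecRuns]
  | cons c rest ih =>
    intro runs s p
    simp only [List.foldl_cons, pvStepB, pvSpecRuns]
    by_cases h : c - p ≠ 1
    · rw [if_pos h, if_pos h, ih]; simp
    · rw [if_neg h, if_neg h, ih]

lemma pvFoldA_eq (range_sep : String) (data : List Int) :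
    ∀ (rest : List Int) (k : Nat) (cur : Int) (res : List String) (rs s : Int),
      data.drop k = cur :: rest →
      ((rs = -1 ∧ s = cur) ∨
       (0 ≤ rs ∧ PySem.List.pyGetD data rs 0 = s ∧ s < cur ∧
        1 ≤ (k : Int) ∧ PySem.List.pyGetD data ((k : Int) - 1) 0 = cur - 1)) →
      ((PySem.List.pyRange (k : Int) (data.length : Int) 1).foldl (pvStepA data range_sep) (res, rs)).1
        = res ++ (pvSpecRuns s cur rest).map (pvFmt range_sep) := by
  intro rest
  induction rest with
  | nil =>
    intro k cur res rs s hdrop hrs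
    have hlen : data.length = k + 1 := by
      have := congrArg List.length hdrop; simp at this; omega
    have hgk : data[k]? = some cur := by
      have := congrArg (fun t => t[0]?) hdrop
      simpa [List.getElem?_drop] using this
    have hek : PySem.List.pyGetD data (k : Int) 0 = cur := by
      rw [PySem.List.pyGetD_natCast]; simp [List.getD, hgk]
    rw [PySem.List.pyRange_one_cons (by push_cast [hlen]; omega : (k : Int) < (data.length : Int))]
    rw [PySem.List.pyRange_one_eq_nil (by push_cast [hlen]; omega)]
    rcases hrs with ⟨h1, h2⟩ | ⟨hrs0, hgs, hlt, hk1, hprev⟩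
    · have hc1 : ¬ (0 ≤ (k : Int) ∧ (k : Int) < (data.length : Int) - 1 ∧ rs = -1 ∧
          PySem.List.pyGetD data ((k : Int) + 1) 0 - cur = 1) := by
        rintro ⟨-, h, -, -⟩; push_cast [hlen] at h; omega
      have hc2 : ¬ (rs ≠ -1 ∧
          (((k : Int) = (data.length : Int) - 1 ∧ cur - PySem.List.pyGetD data ((k : Int) - 1) 0 = 1) ∨
           ((k : Int) < (data.length : Int) - 1 ∧ PySem.List.pyGetD data ((k : Int) + 1) 0 - cur ≠ 1))) := by
        rintro ⟨h, -⟩; exact h h1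
      have hstep : pvStepA data range_sep (res, rs) (k : Int)
          = (res ++ [PySem.Int.toStr cur], rs) := by
        simp only [pvStepA]
        rw [hek, if_neg hc1, if_neg hc2, if_pos h1]
      rw [List.foldl_cons, hstep, List.foldl_nil]
      simp [pvSpecRuns, pvFmt, h2]
    · have hrsne : rs ≠ -1 := by omega
      have hc1 : ¬ (0 ≤ (k : Int) ∧ (k : Int) < (data.length : Int) - 1 ∧ rs = -1 ∧
          PySem.List.pyGetD data ((k : Int) + 1) 0 - cur = 1) := by
        rintro ⟨-, -, h, -⟩; exact hrsne h
      have hc2 : rs ≠ -1 ∧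
          (((k : Int) = (data.length : Int) - 1 ∧ cur - PySem.List.pyGetD data ((k : Int) - 1) 0 = 1) ∨
           ((k : Int) < (data.length : Int) - 1 ∧ PySem.List.pyGetD data ((k : Int) + 1) 0 - cur ≠ 1)) :=
        ⟨hrsne, Or.inl ⟨by push_cast [hlen]; omega, by rw [hprev]; ring⟩⟩
      have hstep : pvStepA data range_sep (res, rs) (k : Int)
          = (res ++ [PySem.Int.toStr s ++ range_sep ++ PySem.Int.toStr cur], -1) := by
        simp only [pvStepA]
        rw [hek, if_neg hc1, if_pos hc2, hgs]
      rw [List.foldl_cons, hstep, List.foldl_nil]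
      simp only [pvSpecRuns, pvFmt, List.map_cons, List.map_nil]
      rw [if_neg (by omega : ¬ s = cur)]
  | cons c rest2 ih =>
    intro k cur res rs s hdrop hrs
    have hk : k < data.length := by
      have := congrArg List.length hdrop; simp at this; omega
    have hdrop1 : data.drop (k + 1) = c :: rest2 := by
      have := congrArg (List.drop 1) hdrop
      simpa [List.drop_drop] using this
    have hk1 : k + 1 < data.length := by
      have := congrArg List.length hdrop; simp at this; omega
    have hgk : data[k]? = some cur := by
      have := congrArg (fun t => t[0]?) hdrop
      simpa [List.getElem?_drop] using this
    have hgk1 : data[k+1]? = some c := by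
      have := congrArg (fun t => t[0]?) hdrop1
      simpa [List.getElem?_drop] using this
    have hek : PySem.List.pyGetD data (k : Int) 0 = cur := by
      rw [PySem.List.pyGetD_natCast]; simp [List.getD, hgk]
    have hcast : (k : Int) + 1 = ((k + 1 : Nat) : Int) := by push_cast; ring
    have hek1 : PySem.List.pyGetD data ((k : Int) + 1) 0 = c := by
      rw [hcast, PySem.List.pyGetD_natCast]; simp [List.getD, hgk1]
    have hprev1 : PySem.List.pyGetD data (((k + 1 : Nat) : Int) - 1) 0 = cur := by
      rw [(by push_cast; ring : ((k + 1 : Nat) : Int) - 1 = (k : Int)), hek]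
    have hkne : ¬ ((k : Int) = (data.length : Int) - 1) := by omega
    have hklt : (k : Int) < (data.length : Int) - 1 := by omega
    rw [PySem.List.pyRange_one_cons (by omega : (k : Int) < (data.length : Int))]
    rcases hrs with ⟨h1, h2⟩ | ⟨hrs0, hgs, hlt, hk1', hprev⟩
    · by_cases hd : c - cur = 1
      · have hc1 : (0 ≤ (k : Int) ∧ (k : Int) < (data.length : Int) - 1 ∧ rs = -1 ∧ c - cur = 1) :=
          ⟨by omega, hklt, h1, hd⟩
        have hc2 : ¬ ((k : Int) ≠ -1 ∧
            (((k : Int) = (data.length : Int) - 1 ∧ cur - PySem.List.pyGetD data ((k : Int) - 1) 0 = 1) ∨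
             ((k : Int) < (data.length : Int) - 1 ∧ c - cur ≠ 1))) := by
          rintro ⟨-, h⟩; rcases h with ⟨h, -⟩ | ⟨-, h⟩; exacts [hkne h, h hd]
        have hc3 : ¬ ((k : Int) = -1) := by omega
        have hstep : pvStepA data range_sep (res, rs) (k : Int) = (res, (k : Int)) := by
          simp only [pvStepA]
          rw [hek, hek1, if_pos hc1, if_neg hc2, if_neg hc3]
        rw [List.foldl_cons, hstep, hcast,
          ih (k + 1) c res ((k : Nat) : Int) cur hdrop1
            (Or.inr ⟨by omega, hek, by omega, by push_cast; omega, by rw [hprev1]; omega⟩)]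
        simp [pvSpecRuns, hd, h2]
      · have hc1 : ¬ (0 ≤ (k : Int) ∧ (k : Int) < (data.length : Int) - 1 ∧ rs = -1 ∧ c - cur = 1) := by
          rintro ⟨-, -, -, h⟩; exact hd h
        have hc2 : ¬ (rs ≠ -1 ∧
            (((k : Int) = (data.length : Int) - 1 ∧ cur - PySem.List.pyGetD data ((k : Int) - 1) 0 = 1) ∨
             ((k : Int) < (data.length : Int) - 1 ∧ c - cur ≠ 1))) := by
          rintro ⟨h, -⟩; exact h h1
        have hstep : pvStepA data range_sep (res, rs) (k : Int)
            = (res ++ [PySem.Int.toStr cur], rs) := by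
          simp only [pvStepA]
          rw [hek, hek1, if_neg hc1, if_neg hc2, if_pos h1]
        rw [List.foldl_cons, hstep, h1, hcast,
          ih (k + 1) c (res ++ [PySem.Int.toStr cur]) (-1) c hdrop1 (Or.inl ⟨rfl, rfl⟩)]
        simp [pvSpecRuns, hd, pvFmt, h2]
    · have hrsne : rs ≠ -1 := by omega
      have hc1 : ¬ (0 ≤ (k : Int) ∧ (k : Int) < (data.length : Int) - 1 ∧ rs = -1 ∧ c - cur = 1) := by
        rintro ⟨-, -, h, -⟩; exact hrsne h
      by_cases hd : c - cur = 1
      · have hc2 : ¬ (rs ≠ -1 ∧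
            (((k : Int) = (data.length : Int) - 1 ∧ cur - PySem.List.pyGetD data ((k : Int) - 1) 0 = 1) ∨
             ((k : Int) < (data.length : Int) - 1 ∧ c - cur ≠ 1))) := by
          rintro ⟨-, h⟩; rcases h with ⟨h, -⟩ | ⟨-, h⟩; exacts [hkne h, h hd]
        have hstep : pvStepA data range_sep (res, rs) (k : Int) = (res, rs) := by
          simp only [pvStepA]
          rw [hek, hek1, if_neg hc1, if_neg hc2, if_neg hrsne]
        rw [List.foldl_cons, hstep, hcast,
          ih (k + 1) c res rs s hdrop1
            (Or.inr ⟨hrs0, hgs, by omega, by push_cast; omega, by rw [hprev1]; omega⟩)]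
        simp [pvSpecRuns, hd]
      · have hc2 : rs ≠ -1 ∧
            (((k : Int) = (data.length : Int) - 1 ∧ cur - PySem.List.pyGetD data ((k : Int) - 1) 0 = 1) ∨
             ((k : Int) < (data.length : Int) - 1 ∧ c - cur ≠ 1)) :=
          ⟨hrsne, Or.inr ⟨hklt, hd⟩⟩
        have hstep : pvStepA data range_sep (res, rs) (k : Int)
            = (res ++ [PySem.Int.toStr s ++ range_sep ++ PySem.Int.toStr cur], -1) := by
          simp only [pvStepA]
          rw [hek, hek1, if_neg hc1, if_pos hc2, hgs]
        rw [List.foldl_cons, hstep, hcast,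
          ih (k + 1) c
            (res ++ [PySem.Int.toStr s ++ range_sep ++ PySem.Int.toStr cur])
            (-1) c hdrop1 (Or.inl ⟨rfl, rfl⟩)]
        simp only [pvSpecRuns, hd, if_pos, ne_eq, not_false_eq_true, List.map_cons, pvFmt]
        rw [if_neg (by omega : ¬ s = cur)]
        simp

-- ===== VERDICT (by name: the statement is the Claim_ definition above) =====
theorem convert_list_to_numeric_ranges_str_spec : Claim_equal_convert_list_to_numeric_ranges_str := by
  intro source_list range_sep sep _
  unfold Spec_convert_list_to_numeric_ranges_str
  unfold convert_list_to_numeric_ranges_str convert_list_to_numeric_ranges_str_alt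
  by_cases hempty : source_list.isEmpty
  · simp [hempty]
  · simp only [hempty, if_neg, Bool.false_eq_true, not_false_eq_true]
    cases hdata : PySem.List.sorted (PySem.Set.ofList source_list) (fun x => x) false with
    | nil => simp [PySem.Str.join, PySem.Chars.join_nil]
    | cons d0 tl =>
      have hA := pvFoldA_eq range_sep (d0 :: tl) tl 0 d0 [] (-1) d0 (by simp) (Or.inl ⟨rfl, rfl⟩)
      have hB := pvFoldB_eq tl [] d0 d0
      simp only [Nat.cast_zero] at hA
      dsimp only
      rw [hA, hB]
      simp
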